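-- pv_equiv track=rewrite | github.com/IlumCI/swarms | CPES/cpes/controllers/value_gate.py | _contains_taboo_violation
-- ===== SOURCE A (Python) =====
-- def _contains_taboo_violation(text: str, taboo: str) -> bool:
--     """Check if text contains taboo content."""
--     taboo_lower = taboo.lower()
--
--     # Check for direct keyword matches
--     if any(word in text for word in taboo_lower.split()):
--         return True
--
--     # Check for common taboo patterns
--     taboo_patterns = {
--         "sentimental monologues": ["i feel", "my heart", "emotionally", "deeply moved"],
--         "moralizing": ["should", "must", "ought to", "it's wrong", "it's right"],
--         "personal stories": ["when i was", "my experience", "i remember when"]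
--     }
--
--     for pattern, keywords in taboo_patterns.items():
--         if pattern in taboo_lower:
--             if any(keyword in text for keyword in keywords):
--                 return True
--
--     return False
-- ===== SOURCE B (Python) =====
-- def _contains_taboo_violation(text: str, taboo: str) -> bool:
--     """Check if text contains taboo content."""
--     taboo_lower = taboo.lower()
--
--     taboo_patterns = {
--         "sentimental monologues": ["i feel", "my heart", "emotionally", "deeply moved"],
--         "moralizing": ["should", "must", "ought to", "it's wrong", "it's right"],
--         "personal stories": ["when i was", "my experience", "i remember when"]
--     }
--
--     # gather every candidate trigger substring
--     candidates = taboo_lower.split()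
--     for pattern, keywords in taboo_patterns.items():
--         if pattern in taboo_lower:
--             candidates.extend(keywords)
--
--     # naive multi-pattern matcher: walk the text position by position and
--     # test every candidate at that position, instead of one `in`-scan per
--     # candidate; correct because `sub in text` iff some position starts sub
--     for i in range(len(text) + 1):
--         if any(text.startswith(c, i) for c in candidates):
--             return True
--     return False
-- ===== Notes on version B (the rewrite author's own statement) =====
-- stated objective: alternative
-- what changed: B gathers the taboo words plus keywords of matching patterns into one candidate list and then runs a naive multi-pattern matcher: a single outer walk over the text positions testing each candidate with startswith at that position, instead of A's per-substring `in` scans with early returns.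
import Mathlib
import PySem

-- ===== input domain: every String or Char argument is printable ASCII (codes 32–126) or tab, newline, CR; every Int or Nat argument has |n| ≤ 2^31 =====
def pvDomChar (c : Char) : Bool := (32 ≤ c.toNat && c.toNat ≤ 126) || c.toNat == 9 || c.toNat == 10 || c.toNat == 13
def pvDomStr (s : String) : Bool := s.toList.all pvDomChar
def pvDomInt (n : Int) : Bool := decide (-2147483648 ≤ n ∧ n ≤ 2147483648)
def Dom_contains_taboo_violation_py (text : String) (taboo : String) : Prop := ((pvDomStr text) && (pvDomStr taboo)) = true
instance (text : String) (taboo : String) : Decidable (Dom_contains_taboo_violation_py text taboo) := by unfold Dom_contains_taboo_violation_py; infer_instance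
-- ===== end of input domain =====

-- B gathers all candidate trigger substrings, then decides by a naive multi-pattern matcher
-- walking the text position by position (objective: alternative decomposition, same cost).

-- the shared literal pattern table (taboo_patterns in both Pythons)
def pvTabooPatterns : List (String × List String) :=
  [("sentimental monologues", ["i feel", "my heart", "emotionally", "deeply moved"]),
   ("moralizing", ["should", "must", "ought to", "it's wrong", "it's right"]),
   ("personal stories", ["when i was", "my experience", "i remember when"])]

-- ===== PORT A =====
-- the for-loop with early 'return True' = any over the items with the guard
def contains_taboo_violation_py (text : String) (taboo : String) : Bool :=
  let taboo_lower := PySem.Str.lower taboo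
  if (PySem.Str.split₀ taboo_lower).any (fun word => PySem.Str.isIn word text) then
    true
  else if pvTabooPatterns.any (fun pk =>
      PySem.Str.isIn pk.1 taboo_lower && pk.2.any (fun keyword => PySem.Str.isIn keyword text)) then
    true
  else
    false

-- ===== PORT B =====
-- text.startswith(c, i) for 0 ≤ i ≤ len(text) is ported by hand, exactly, as
-- c.toList.isPrefixOf (text.toList.drop i); range(len(text)+1) is List.range (len+1)
def contains_taboo_violation_py_alt (text : String) (taboo : String) : Bool :=
  let taboo_lower := PySem.Str.lower taboo
  let candidates := pvTabooPatterns.foldl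
    (fun acc pk => if PySem.Str.isIn pk.1 taboo_lower then acc ++ pk.2 else acc)
    (PySem.Str.split₀ taboo_lower)
  let chars := text.toList
  (List.range (chars.length + 1)).any (fun i =>
    candidates.any (fun c => c.toList.isPrefixOf (chars.drop i)))

-- ===== PRECONDITION & SPEC =====
def Spec_contains_taboo_violation_py (text : String) (taboo : String) (out : Bool) : Prop := out = contains_taboo_violation_py_alt text taboo
instance (text : String) (taboo : String) (out : Bool) : Decidable (Spec_contains_taboo_violation_py text taboo out) := by unfold Spec_contains_taboo_violation_py; infer_instance

-- ===== CLAIM (what is proved, stated in full; the proofs are below) =====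
def Claim_equal_contains_taboo_violation_py : Prop := ∀ (text : String) (taboo : String), Dom_contains_taboo_violation_py text taboo → Spec_contains_taboo_violation_py text taboo (contains_taboo_violation_py text taboo)

-- ===== LEMMAS AND PROOFS =====

-- swapping the two any-scans (positions outside, candidates inside ↔ the reverse)
theorem pv_any_swap {α β : Type} (xs : List α) (ys : List β) (p : α → β → Bool) :
    xs.any (fun x => ys.any (fun y => p x y)) = ys.any (fun y => xs.any (fun x => p x y)) := by
  rw [Bool.eq_iff_iff]
  simp only [List.any_eq_true]
  tauto

-- position-by-position startswith scan over range(len+1) = Python's substring test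
theorem pv_posscan_eq_isIn (sub s : String) :
    (List.range (s.toList.length + 1)).any (fun i => sub.toList.isPrefixOf (s.toList.drop i))
      = PySem.Str.isIn sub s := by
  rw [Bool.eq_iff_iff, List.any_eq_true]
  constructor
  · rintro ⟨i, -, hp⟩
    exact (PySem.Str.isIn_iff_infix _ _).mpr
      ((List.isPrefixOf_iff_prefix.mp hp).isInfix.trans (List.drop_suffix i s.toList).isInfix)
  · intro h
    rcases (PySem.Chars.exists_prefix_drop_iff_isIn sub.toList s.toList).2
      ((PySem.Chars.isIn_iff_infix _ _).mpr ((PySem.Str.isIn_iff_infix _ _).mp h)) with ⟨j, hj⟩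
    refine ⟨min j s.toList.length, ?_, ?_⟩
    · simp [List.mem_range]
    · rcases Nat.lt_or_ge j (s.toList.length + 1) with hlt | hge
      · have hle : j ≤ s.toList.length := by omega
        rw [min_eq_left hle]; exact List.isPrefixOf_iff_prefix.mpr hj
      · have hgt : s.toList.length < j := by omega
        rw [min_eq_right (le_of_lt hgt)]
        have hnil : s.toList.drop j = [] := List.drop_eq_nil_of_le (le_of_lt hgt)
        rw [hnil] at hj
        have hs : sub.toList = [] := List.prefix_nil.mp hj
        simp [hs]

-- gathering keywords of matching patterns equals the guarded any over the patterns, or-ed with the seed scan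
theorem pv_foldl_gather_any (text taboo_lower : String)
    (pairs : List (String × List String)) (seed : List String) :
    (pairs.foldl (fun acc pk => if PySem.Str.isIn pk.1 taboo_lower then acc ++ pk.2 else acc) seed).any
        (fun sub => PySem.Str.isIn sub text)
      = (seed.any (fun sub => PySem.Str.isIn sub text)
          || pairs.any (fun pk => PySem.Str.isIn pk.1 taboo_lower
                && pk.2.any (fun keyword => PySem.Str.isIn keyword text))) := by
  induction pairs generalizing seed with
  | nil => simp
  | cons hd tl ih =>
      simp only [List.foldl_cons, List.any_cons]
      rw [ih]
      by_cases h : PySem.Str.isIn hd.1 taboo_lower = true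
      · rw [if_pos h, h, Bool.true_and, List.any_append, Bool.or_assoc]
      · rw [if_neg h, Bool.eq_false_iff.mpr h, Bool.false_and, Bool.false_or]

-- ===== VERDICT (by name: the statement is the Claim_ definition above) =====
theorem contains_taboo_violation_py_spec : Claim_equal_contains_taboo_violation_py := by
  intro text taboo _
  unfold Spec_contains_taboo_violation_py contains_taboo_violation_py contains_taboo_violation_py_alt
  rw [pv_any_swap]
  simp only [pv_posscan_eq_isIn]
  rw [pv_foldl_gather_any]
  split_ifs with h1 h2
  · rw [h1, Bool.true_or]
  · rw [h2, Bool.or_true]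
  · rw [Bool.eq_false_iff.mpr h1, Bool.eq_false_iff.mpr h2, Bool.false_or]
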